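-- pv_equiv track=rewrite | github.com/jianiM/pMHChat | create_peptide_feature.py | trimming_fasta
-- ===== SOURCE A (Python) =====
-- def trimming_fasta(fasta_seqs,trimmed_thresh,padding):
--     trimmed_fastas = []
--     for i in range(len(fasta_seqs)):
--         fasta = fasta_seqs[i]
--         seq_len = len(fasta)
--         if seq_len > trimmed_thresh:
--             trimmed_fasta = fasta[0:trimmed_thresh]
--         elif seq_len < trimmed_thresh:
--             trimmed_fasta = fasta + (padding*(trimmed_thresh-seq_len))
--         else:
--             trimmed_fasta = fasta
--         trimmed_fastas.append(trimmed_fasta)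
--     return trimmed_fastas
-- ===== SOURCE B (Python) =====
-- def trimming_fasta(fasta_seqs, trimmed_thresh, padding):
--     # budget-driven merge: consume one unit of budget per output position,
--     # taking the next character while the sequence lasts, then whole padding blocks
--     out = []
--     for s in fasta_seqs:
--         parts = []
--         it = iter(s)
--         k = trimmed_thresh
--         while k > 0:
--             ch = next(it, None)
--             parts.append(ch if ch is not None else padding)
--             k -= 1
--         out.append("".join(parts))
--     return out
-- ===== Notes on version B (the rewrite author's own statement) =====
-- stated objective: alternative
-- what changed: Replaces per-element branch on length with slicing/string-multiplication by a budget-driven merge loop: one output unit per remaining budget, taking the next character while the sequence lasts, then whole padding blocks.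
-- intended difference: For negative trimmed_thresh with some sequence longer than |trimmed_thresh|, A's slice fasta[0:t] accidentally drops characters from the end (negative-index slice semantics) and returns a nonempty tail-trimmed string, while B returns the empty string, the intended result of trimming to a non-positive length. — e.g. on trimming_fasta(["abc"], -1, "X"): A returns ["ab"], B returns [""]
import Mathlib
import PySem

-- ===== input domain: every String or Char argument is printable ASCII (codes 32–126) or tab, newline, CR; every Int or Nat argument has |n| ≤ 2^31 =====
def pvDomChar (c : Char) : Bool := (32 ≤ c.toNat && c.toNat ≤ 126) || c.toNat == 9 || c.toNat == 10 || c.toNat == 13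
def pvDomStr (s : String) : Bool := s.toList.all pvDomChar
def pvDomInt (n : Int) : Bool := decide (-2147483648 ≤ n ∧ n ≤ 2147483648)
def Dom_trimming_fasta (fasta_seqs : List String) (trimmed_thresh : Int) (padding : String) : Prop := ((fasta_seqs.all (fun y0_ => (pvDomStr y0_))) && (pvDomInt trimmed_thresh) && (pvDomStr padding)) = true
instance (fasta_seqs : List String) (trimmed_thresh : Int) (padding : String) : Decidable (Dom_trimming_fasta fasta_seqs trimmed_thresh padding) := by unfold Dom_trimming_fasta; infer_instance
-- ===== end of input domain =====

-- B replaces A's per-element length branch with slicing/multiplication by a budget-driven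
-- merge loop (one output unit per budget step: next char while the sequence lasts, then
-- whole padding blocks); equal to A except for negative thresholds, where B's empty string
-- is the intended value (see D_).

-- ===== PORT A =====
-- one iteration of A's loop body (the if/elif/else on one fasta)
def pvTrimOneA (trimmed_thresh : Int) (padding : String) (fasta : String) : String :=
  let seq_len : Int := fasta.toList.length
  if seq_len > trimmed_thresh then
    String.ofList (PySem.List.slice fasta.toList (some 0) (some trimmed_thresh))
  else if seq_len < trimmed_thresh then
    String.ofList (fasta.toList ++ PySem.List.pyRepeat padding.toList (trimmed_thresh - seq_len))
  else
    fasta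

def trimming_fasta (fasta_seqs : List String) (trimmed_thresh : Int) (padding : String) : List String :=
  (PySem.List.pyRange 0 fasta_seqs.length 1).foldl
    (fun trimmed_fastas i =>
      trimmed_fastas ++ [pvTrimOneA trimmed_thresh padding (PySem.List.pyGetD fasta_seqs i "")])
    []

-- ===== PORT B =====
-- B's inner while-loop: the budget k counts down one per output unit; take the next
-- char while the sequence lasts, else append a whole padding block. The loop runs
-- exactly k.toNat iterations, which is the structural counter here.
def pvFitGoN (pad : List Char) : List Char → Nat → List Char
  | _, 0 => []
  | [], n + 1 => pad ++ pvFitGoN pad [] n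
  | c :: rest, n + 1 => c :: pvFitGoN pad rest n

def pvFitGo (pad : List Char) (cs : List Char) (k : Int) : List Char :=
  pvFitGoN pad cs k.toNat

def trimming_fasta_alt (fasta_seqs : List String) (trimmed_thresh : Int) (padding : String) : List String :=
  fasta_seqs.foldl
    (fun out s => out ++ [String.ofList (pvFitGo padding.toList s.toList trimmed_thresh)])
    []

-- ===== PRECONDITION & SPEC =====
-- For negative trimmed_thresh with some sequence longer than |trimmed_thresh|, A's
-- fasta[0:t] accidentally trims from the END (negative slice index) and returns a
-- nonempty string; B returns "", the intended result of trimming to a non-positive length.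
def D_trimming_fasta (fasta_seqs : List String) (trimmed_thresh : Int) (padding : String) : Prop :=
  trimmed_thresh < 0 ∧ ∃ s ∈ fasta_seqs, (-trimmed_thresh) < (s.toList.length : Int)
instance (fasta_seqs : List String) (trimmed_thresh : Int) (padding : String) : Decidable (D_trimming_fasta fasta_seqs trimmed_thresh padding) := by unfold D_trimming_fasta; infer_instance

def Spec_trimming_fasta (fasta_seqs : List String) (trimmed_thresh : Int) (padding : String) (out : List String) : Prop := ¬ D_trimming_fasta fasta_seqs trimmed_thresh padding → out = trimming_fasta_alt fasta_seqs trimmed_thresh padding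
instance (fasta_seqs : List String) (trimmed_thresh : Int) (padding : String) (out : List String) : Decidable (Spec_trimming_fasta fasta_seqs trimmed_thresh padding out) := by unfold Spec_trimming_fasta; infer_instance

def pvDiffWitness_trimming_fasta : List String × Int × String := (["abc"], -1, "X")
def pvDiffWitnessOut_trimming_fasta : (List String) × (List String) := (["ab"], [""])

-- ===== CLAIM =====
def Claim_unchanged_trimming_fasta : Prop := ∀ (fasta_seqs : List String) (trimmed_thresh : Int) (padding : String), Dom_trimming_fasta fasta_seqs trimmed_thresh padding → Spec_trimming_fasta fasta_seqs trimmed_thresh padding (trimming_fasta fasta_seqs trimmed_thresh padding)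
def Claim_changed_trimming_fasta : Prop := Dom_trimming_fasta (pvDiffWitness_trimming_fasta.1) (pvDiffWitness_trimming_fasta.2.1) (pvDiffWitness_trimming_fasta.2.2) ∧ D_trimming_fasta (pvDiffWitness_trimming_fasta.1) (pvDiffWitness_trimming_fasta.2.1) (pvDiffWitness_trimming_fasta.2.2) ∧ trimming_fasta (pvDiffWitness_trimming_fasta.1) (pvDiffWitness_trimming_fasta.2.1) (pvDiffWitness_trimming_fasta.2.2) = pvDiffWitnessOut_trimming_fasta.1 ∧ trimming_fasta_alt (pvDiffWitness_trimming_fasta.1) (pvDiffWitness_trimming_fasta.2.1) (pvDiffWitness_trimming_fasta.2.2) = pvDiffWitnessOut_trimming_fasta.2 ∧ pvDiffWitnessOut_trimming_fasta.1 ≠ pvDiffWitnessOut_trimming_fasta.2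
def Claim_exact_trimming_fasta : Prop := ∀ (fasta_seqs : List String) (trimmed_thresh : Int) (padding : String), Dom_trimming_fasta fasta_seqs trimmed_thresh padding → D_trimming_fasta fasta_seqs trimmed_thresh padding → trimming_fasta fasta_seqs trimmed_thresh padding ≠ trimming_fasta_alt fasta_seqs trimmed_thresh padding

-- ===== LEMMAS AND PROOFS =====
theorem pvRepeat_eq_flatten (pad : List Char) (n : Int) :
    PySem.List.pyRepeat pad n = (List.replicate n.toNat pad).flatten := by
  simp [PySem.List.pyRepeat]

theorem pvFitGoN_spec (pad : List Char) : ∀ (n : Nat) (cs : List Char),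
    pvFitGoN pad cs n = cs.take n ++ (List.replicate (n - cs.length) pad).flatten := by
  intro n
  induction n with
  | zero => intro cs; simp [pvFitGoN]
  | succ m ih =>
    intro cs
    cases cs with
    | nil => simp [pvFitGoN, ih, List.replicate_succ]
    | cons c rest => simp [pvFitGoN, ih, List.take_succ_cons]

theorem pvElem_eq (t : Int) (p s : String)
    (h : 0 ≤ t ∨ (t < 0 ∧ (s.toList.length : Int) ≤ -t)) :
    pvTrimOneA t p s = String.ofList (pvFitGo p.toList s.toList t) := by
  unfold pvTrimOneA pvFitGo
  rw [pvFitGoN_spec]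
  set cs := s.toList with hcs
  rcases h with ht | ⟨ht, hlen⟩
  · by_cases h1 : (cs.length : Int) > t
    · have h0 : t.toNat - cs.length = 0 := by omega
      have hsl : PySem.List.slice cs (some 0) (some t) = cs.take t.toNat := by
        simp [PySem.List.slice_to _ ht]
      rw [if_pos h1, hsl, h0]
      simp
    · by_cases h2 : (cs.length : Int) < t
      · have htake : cs.take t.toNat = cs := List.take_of_length_le (by omega)
        have hn : t.toNat - cs.length = (t - (cs.length : Int)).toNat := by omega
        rw [if_neg h1, if_pos h2, htake, hn, pvRepeat_eq_flatten]
      · have htake : cs.take t.toNat = cs := List.take_of_length_le (by omega)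
        have h0 : t.toNat - cs.length = 0 := by omega
        rw [if_neg h1, if_neg h2, htake, h0]
        simp [hcs, String.ofList_toList]
  · -- t is negative and cs is short enough: both sides are the empty string
    have h1 : (cs.length : Int) > t := by omega
    have h0 : t.toNat = 0 := by omega
    have hk : 0 < (-t).toNat := by omega
    have ht' : t = -(((-t).toNat : Nat) : Int) := by omega
    have hsl : PySem.List.slice cs (some 0) (some t) = [] := by
      rw [ht']
      simp only [PySem.List.slice_zero_start]
      rw [PySem.List.slice_to_neg_natCast _ _ hk]
      have hz : cs.length - (-t).toNat = 0 := by omega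
      simp [hz]
    rw [if_pos h1, hsl, h0]
    simp

-- map forms of the two ports
theorem trimming_fasta_eq_map (fs : List String) (t : Int) (p : String) :
    trimming_fasta fs t p = fs.map (pvTrimOneA t p) := by
  unfold trimming_fasta
  rw [PySem.List.foldl_pyRange_zero_pyGetD' fs "" (fun acc x => acc ++ [pvTrimOneA t p x]) []]
  rw [PySem.List.foldl_append_singleton_eq_map]
  rfl

theorem trimming_fasta_alt_eq_map (fs : List String) (t : Int) (p : String) :
    trimming_fasta_alt fs t p = fs.map (fun s => String.ofList (pvFitGo p.toList s.toList t)) := by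
  unfold trimming_fasta_alt
  rw [PySem.List.foldl_append_singleton_eq_map]
  rfl

-- ===== VERDICT =====
theorem trimming_fasta_spec : Claim_unchanged_trimming_fasta := by
  intro fs t p _ hD
  show trimming_fasta fs t p = trimming_fasta_alt fs t p
  rw [trimming_fasta_eq_map, trimming_fasta_alt_eq_map]
  apply List.map_congr_left
  intro s hs
  apply pvElem_eq
  unfold D_trimming_fasta at hD
  push Not at hD
  by_cases ht : 0 ≤ t
  · exact Or.inl ht
  · exact Or.inr ⟨by omega, by have := hD (by omega) s hs; omega⟩

theorem trimming_fasta_changed : Claim_changed_trimming_fasta := by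
  unfold Claim_changed_trimming_fasta; decide

theorem trimming_fasta_tight : Claim_exact_trimming_fasta := by
  intro fs t p _ hD heq
  obtain ⟨ht, s, hs, hlen⟩ := hD
  rw [trimming_fasta_eq_map, trimming_fasta_alt_eq_map] at heq
  obtain ⟨i, hi, hget⟩ := List.mem_iff_getElem.mp hs
  have h := congrArg (fun l => l[i]?) heq
  simp only [List.getElem?_map] at h
  rw [List.getElem?_eq_getElem hi, hget] at h
  simp only [Option.map_some] at h
  have hB : pvFitGo p.toList s.toList t = [] := by
    unfold pvFitGo
    have h0 : t.toNat = 0 := by omega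
    rw [h0]
    cases s.toList <;> rfl
  have hk : 0 < (-t).toNat := by omega
  have ht' : t = -(((-t).toNat : Nat) : Int) := by omega
  have hsl : PySem.List.slice s.toList (some 0) (some t) =
      s.toList.take (s.toList.length - (-t).toNat) := by
    rw [ht']
    simp only [PySem.List.slice_zero_start]
    rw [PySem.List.slice_to_neg_natCast _ _ hk]
    simp
    omega
  have hA : pvTrimOneA t p s =
      String.ofList (s.toList.take (s.toList.length - (-t).toNat)) := by
    unfold pvTrimOneA
    rw [if_pos (show (s.toList.length : Int) > t by omega), hsl]
  rw [hA, hB] at h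
  have h' := String.ofList_inj.mp (Option.some.inj h)
  have hlen' := congrArg List.length h'
  simp only [List.length_take, List.length_nil] at hlen'
  omega
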